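-- pv_equiv track=rewrite | github.com/PaiCY-T/ML4T | alerts/alert_system.py | _generate_retraining_recommendation
-- ===== SOURCE A (Python) =====
-- from typing import Dict, List, Optional, Set, Callable, Any, Union
--
-- def _generate_retraining_recommendation(triggers: List[Dict[str, Any]]) -> str:
--     """Generate retraining recommendation."""
--     if not triggers:
--         return "Model performance stable, no retraining required."
--
--     critical_triggers = [t for t in triggers if t['severity'] == 'critical']
--     if critical_triggers:
--         return "URGENT: Initiate emergency model retraining immediately."
--
--     high_triggers = [t for t in triggers if t['severity'] == 'high']
--     if len(high_triggers) >= 2: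
--         return "Recommend scheduled model retraining within 24-48 hours."
--     elif high_triggers:
--         return "Monitor model closely. Prepare for potential retraining."
--
--     return "Minor issues detected. Continue monitoring."
-- ===== SOURCE B (Python) =====
-- def _rank(sev):
--     if sev == 'critical':
--         return 2
--     if sev == 'high':
--         return 1
--     return 0
--
-- def _generate_retraining_recommendation(triggers):
--     """Sort the severity ranks ascending and decide from the top two entries."""
--     if not triggers:
--         return "Model performance stable, no retraining required."
--     ranks = sorted(_rank(t['severity']) for t in triggers)
--     top = ranks[-1]
--     second = ranks[-2] if len(ranks) > 1 else 0
--     if top == 2: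
--         return "URGENT: Initiate emergency model retraining immediately."
--     if second == 1:
--         return "Recommend scheduled model retraining within 24-48 hours."
--     if top == 1:
--         return "Monitor model closely. Prepare for potential retraining."
--     return "Minor issues detected. Continue monitoring."
-- ===== Notes on version B (the rewrite author's own statement) =====
-- stated objective: alternative
-- what changed: B maps each trigger to a numeric severity rank, sorts the ranks, and reads the decision off the two largest entries, instead of A's per-severity list-comprehension filters with emptiness/length tests.
import Mathlib
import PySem

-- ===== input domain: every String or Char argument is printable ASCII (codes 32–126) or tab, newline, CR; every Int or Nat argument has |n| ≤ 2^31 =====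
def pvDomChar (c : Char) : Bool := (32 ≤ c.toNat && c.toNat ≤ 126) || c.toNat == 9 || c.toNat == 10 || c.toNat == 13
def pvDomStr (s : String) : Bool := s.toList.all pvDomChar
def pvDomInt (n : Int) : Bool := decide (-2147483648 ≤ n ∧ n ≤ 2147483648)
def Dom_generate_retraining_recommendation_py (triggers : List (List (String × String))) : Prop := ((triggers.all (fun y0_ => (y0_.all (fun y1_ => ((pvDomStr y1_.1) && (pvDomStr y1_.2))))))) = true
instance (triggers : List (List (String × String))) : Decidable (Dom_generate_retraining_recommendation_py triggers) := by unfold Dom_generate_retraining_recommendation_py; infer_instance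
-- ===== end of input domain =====

-- B maps each trigger to a numeric rank, sorts the ranks and decides from the top two entries,
-- instead of A's per-severity filter lists; same return value on Pre_.
-- Both Pythons raise KeyError on a trigger without a 'severity' key; Pre_ excludes exactly those inputs.

-- shared helper: t['severity'] (first match in the association list); default "" is never
-- reached under Pre_ (every trigger carries the key)
def pvSev (t : List (String × String)) : String :=
  ((PySem.Dict.mk t).get? "severity").getD ""

-- ===== PORT A =====
def generate_retraining_recommendation_py (triggers : List (List (String × String))) : String :=
  if triggers = [] then "Model performance stable, no retraining required."
  else
    let critical_triggers := triggers.filter (fun t => pvSev t == "critical")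
    if critical_triggers ≠ [] then "URGENT: Initiate emergency model retraining immediately."
    else
      let high_triggers := triggers.filter (fun t => pvSev t == "high")
      if high_triggers.length ≥ 2 then "Recommend scheduled model retraining within 24-48 hours."
      else if high_triggers ≠ [] then "Monitor model closely. Prepare for potential retraining."
      else "Minor issues detected. Continue monitoring."

-- ===== PORT B =====
-- Source B's _rank helper
def pvRank (sev : String) : Int :=
  if sev == "critical" then 2 else if sev == "high" then 1 else 0

def generate_retraining_recommendation_py_alt (triggers : List (List (String × String))) : String :=
  if triggers = [] then "Model performance stable, no retraining required."
  else
    let ranks := PySem.List.sorted (triggers.map (fun t => pvRank (pvSev t))) (fun x => x) false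
    let top := PySem.List.pyGetD ranks (-1) 0
    let second := if 1 < ranks.length then PySem.List.pyGetD ranks (-2) 0 else 0
    if top == 2 then "URGENT: Initiate emergency model retraining immediately."
    else if second == 1 then "Recommend scheduled model retraining within 24-48 hours."
    else if top == 1 then "Monitor model closely. Prepare for potential retraining."
    else "Minor issues detected. Continue monitoring."

-- ===== PRECONDITION & SPEC =====
-- Pre_: every trigger has a 'severity' key; on any other input both Pythons raise KeyError.
def Pre_generate_retraining_recommendation_py (triggers : List (List (String × String))) : Prop :=
  ∀ t ∈ triggers, "severity" ∈ t.map Prod.fst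
instance (triggers : List (List (String × String))) : Decidable (Pre_generate_retraining_recommendation_py triggers) := by unfold Pre_generate_retraining_recommendation_py; infer_instance
def pvWitness_generate_retraining_recommendation_py : (List (List (String × String))) := [[("severity", "high")], [("severity", "low")]]

def Spec_generate_retraining_recommendation_py (triggers : List (List (String × String))) (out : String) : Prop := out = generate_retraining_recommendation_py_alt triggers
instance (triggers : List (List (String × String))) (out : String) : Decidable (Spec_generate_retraining_recommendation_py triggers out) := by unfold Spec_generate_retraining_recommendation_py; infer_instance

-- ===== CLAIM (what is proved, stated in full; the proofs are below) =====
def Claim_equal_generate_retraining_recommendation_py : Prop := ∀ (triggers : List (List (String × String))), Dom_generate_retraining_recommendation_py triggers → Pre_generate_retraining_recommendation_py triggers → Spec_generate_retraining_recommendation_py triggers (generate_retraining_recommendation_py triggers)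

-- ===== LEMMAS AND PROOFS =====

-- the three severity-class counts (proof-side abbreviations for A's filter lengths)
def cCrit (triggers : List (List (String × String))) : Nat :=
  (triggers.filter (fun t => pvSev t == "critical")).length
def cHigh (triggers : List (List (String × String))) : Nat :=
  (triggers.filter (fun t => pvSev t == "high")).length
def cOther (triggers : List (List (String × String))) : Nat :=
  (triggers.filter (fun t => !(pvSev t == "critical") && !(pvSev t == "high"))).length

-- the mapped ranks are a permutation of the counts laid out in ascending blocks
theorem ranks_perm (triggers : List (List (String × String))) :
    (List.replicate (cOther triggers) (0 : Int) ++ List.replicate (cHigh triggers) 1 ++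
      List.replicate (cCrit triggers) 2).Perm
    (triggers.map (fun t => pvRank (pvSev t))) := by
  induction triggers with
  | nil => simp [cOther, cHigh, cCrit]
  | cons t rest ih =>
    have hmap : (t :: rest).map (fun t => pvRank (pvSev t))
        = pvRank (pvSev t) :: rest.map (fun t => pvRank (pvSev t)) := rfl
    by_cases hc : (pvSev t == "critical") = true
    · have hh : (pvSev t == "high") = false := by rw [beq_iff_eq] at hc; simp [hc]
      have e0 : cOther (t :: rest) = cOther rest := by simp [cOther, hc]
      have e1 : cHigh (t :: rest) = cHigh rest := by simp [cHigh, hh]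
      have e2 : cCrit (t :: rest) = cCrit rest + 1 := by simp [cCrit, hc]
      have hr : pvRank (pvSev t) = 2 := by simp [pvRank, hc]
      rw [hmap, e0, e1, e2, hr, List.replicate_succ]
      exact List.perm_middle.trans (ih.cons 2)
    · by_cases hh : (pvSev t == "high") = true
      · have e0 : cOther (t :: rest) = cOther rest := by simp [cOther, hh]
        have e1 : cHigh (t :: rest) = cHigh rest + 1 := by simp [cHigh, hh]
        have e2 : cCrit (t :: rest) = cCrit rest := by simp [cCrit, hc]
        have hr : pvRank (pvSev t) = 1 := by simp [pvRank, hc, hh]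
        rw [hmap, e0, e1, e2, hr, List.replicate_succ, List.append_assoc, List.cons_append]
        refine List.perm_middle.trans (List.Perm.cons 1 ?_)
        rw [← List.append_assoc]; exact ih
      · have e0 : cOther (t :: rest) = cOther rest + 1 := by
          simp [cOther, hc, hh]
        have e1 : cHigh (t :: rest) = cHigh rest := by simp [cHigh, hh]
        have e2 : cCrit (t :: rest) = cCrit rest := by simp [cCrit, hc]
        have hr : pvRank (pvSev t) = 0 := by simp [pvRank, hc, hh]
        rw [hmap, e0, e1, e2, hr, List.replicate_succ, List.cons_append, List.cons_append]
        exact ih.cons 0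

-- the ascending block layout is exactly the sorted rank list
theorem sorted_ranks (triggers : List (List (String × String))) :
    PySem.List.sorted (triggers.map (fun t => pvRank (pvSev t))) (fun x => x) false =
      List.replicate (cOther triggers) (0 : Int) ++ List.replicate (cHigh triggers) 1 ++
      List.replicate (cCrit triggers) 2 := by
  apply PySem.List.sorted_id_eq_of_perm_of_pairwise
  · exact ranks_perm triggers
  · refine (List.pairwise_append.mpr ⟨List.pairwise_append.mpr
      ⟨List.pairwise_replicate.mpr (Or.inr le_rfl),
       List.pairwise_replicate.mpr (Or.inr le_rfl), ?_⟩,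
      List.pairwise_replicate.mpr (Or.inr le_rfl), ?_⟩)
    · intro a ha b hb
      rw [List.eq_of_mem_replicate ha, List.eq_of_mem_replicate hb]; norm_num
    · intro a ha b hb
      rw [List.eq_of_mem_replicate hb]
      rcases List.mem_append.mp ha with h | h <;>
        rw [List.eq_of_mem_replicate h] <;> norm_num

-- the three counts partition the list
theorem counts_len (triggers : List (List (String × String))) :
    cOther triggers + cHigh triggers + cCrit triggers = triggers.length := by
  induction triggers with
  | nil => simp [cOther, cHigh, cCrit]
  | cons t rest ih =>
    by_cases hc : (pvSev t == "critical") = true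
    · have hh : (pvSev t == "high") = false := by rw [beq_iff_eq] at hc; simp [hc]
      simp [cOther, cHigh, cCrit, hc, hh] at ih ⊢; omega
    · by_cases hh : (pvSev t == "high") = true
      · simp [cOther, cHigh, cCrit, hc, hh] at ih ⊢; omega
      · simp [cOther, cHigh, cCrit, hc, hh] at ih ⊢; omega

-- indexing into the three ascending replicate blocks
theorem block_get (n0 n1 n2 j : Nat)
    (hs : j < (List.replicate n0 (0:Int) ++ List.replicate n1 1 ++ List.replicate n2 2).length) :
    (List.replicate n0 (0:Int) ++ List.replicate n1 1 ++ List.replicate n2 2)[j]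
      = if j < n0 then 0 else if j < n0 + n1 then 1 else 2 := by
  rcases lt_or_ge j n0 with h0 | h0
  · rw [List.getElem_append_left (by simp; omega), List.getElem_append_left (by simpa),
      List.getElem_replicate, if_pos h0]
  · rcases lt_or_ge j (n0 + n1) with h1 | h1
    · rw [List.getElem_append_left (by simp; omega), List.getElem_append_right (by simpa),
        List.getElem_replicate, if_neg (by omega), if_pos (by omega)]
    · rw [List.getElem_append_right (by simp; omega), List.getElem_replicate,
        if_neg (by omega), if_neg (by omega)]

-- ranks[-1] of the block layout: the largest rank present
theorem block_last (n0 n1 n2 : Nat) (h : 0 < n0 + n1 + n2) :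
    PySem.List.pyGetD (List.replicate n0 (0:Int) ++ List.replicate n1 1 ++ List.replicate n2 2) (-1) 0
      = if 0 < n2 then 2 else if 0 < n1 then 1 else 0 := by
  rw [PySem.List.pyGetD_neg_ofNat _ 1 0 (by omega) (by simp; omega)]
  simp only [List.length_append, List.length_replicate]
  rw [block_get n0 n1 n2 _ (by simp; omega)]
  split_ifs <;> omega

-- ranks[-2] of the block layout: the second-largest rank present
theorem block_penult (n0 n1 n2 : Nat) (h : 2 ≤ n0 + n1 + n2) :
    PySem.List.pyGetD (List.replicate n0 (0:Int) ++ List.replicate n1 1 ++ List.replicate n2 2) (-2) 0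
      = if n0 + n1 + n2 - 2 < n0 then 0 else if n0 + n1 + n2 - 2 < n0 + n1 then 1 else 2 := by
  rw [PySem.List.pyGetD_neg_ofNat _ 2 0 (by omega) (by simp; omega)]
  simp only [List.length_append, List.length_replicate]
  exact block_get n0 n1 n2 _ (by simp; omega)

-- ===== VERDICT (by name: the statement is the Claim_ definition above) =====
theorem generate_retraining_recommendation_py_spec : Claim_equal_generate_retraining_recommendation_py := by
  intro triggers _ _
  unfold Spec_generate_retraining_recommendation_py
  unfold generate_retraining_recommendation_py generate_retraining_recommendation_py_alt
  by_cases he : triggers = []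
  · simp [he]
  · simp only [he, if_false, ne_eq]
    rw [sorted_ranks]
    have hlen := counts_len triggers
    have hpos : 0 < triggers.length := List.length_pos_iff.mpr he
    have hccrit : (triggers.filter (fun t => pvSev t == "critical") = []) ↔ cCrit triggers = 0 := by
      rw [← List.length_eq_zero_iff]; rfl
    have hchigh : (triggers.filter (fun t => pvSev t == "high") = []) ↔ cHigh triggers = 0 := by
      rw [← List.length_eq_zero_iff]; rfl
    have hchl : (triggers.filter (fun t => pvSev t == "high")).length = cHigh triggers := rfl
    rw [block_last _ _ _ (by omega)]
    simp only [List.length_append, List.length_replicate, hccrit, hchigh, hchl, beq_iff_eq,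
      ge_iff_le]
    by_cases hg : 1 < cOther triggers + cHigh triggers + cCrit triggers
    · rw [if_pos hg, block_penult _ _ _ (by omega)]
      split_ifs <;> first | rfl | omega
    · rw [if_neg hg]
      split_ifs <;> first | rfl | omega
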